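-- pv_equiv track=rewrite | github.com/MuhammadSheraza002/Object-Oriented-Programming-Using-Python | Practise/Practice 04 Repetition structure+ lists/Task 05.py | difference_of_list
-- ===== SOURCE A (Python) =====
-- def difference_of_list(min_list,max_list):
--     max = max_list[0] - min_list[0]
--     index = 0
--     for i in range(len(max_list)):
--         if max < max_list[i] - min_list[i]:
--             max = max_list[i] - min_list[i]
--             index = i
--     return index
-- ===== SOURCE B (Python) =====
-- def difference_of_list(min_list, max_list):
--     # Sort the indices by ascending (min - max) difference; stability of sorted
--     # keeps the earliest index first among ties, so the head is the first argmax
--     # of max_list[i] - min_list[i].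
--     order = sorted(range(len(max_list)), key=lambda i: min_list[i] - max_list[i])
--     return order[0]
-- ===== Notes on version B (the rewrite author's own statement) =====
-- stated objective: alternative
-- what changed: Replaces A's single-pass running-max/index loop with a sort of the index list keyed by the negated difference, returning the head of the stable sort (first argmax).
import Mathlib
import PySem

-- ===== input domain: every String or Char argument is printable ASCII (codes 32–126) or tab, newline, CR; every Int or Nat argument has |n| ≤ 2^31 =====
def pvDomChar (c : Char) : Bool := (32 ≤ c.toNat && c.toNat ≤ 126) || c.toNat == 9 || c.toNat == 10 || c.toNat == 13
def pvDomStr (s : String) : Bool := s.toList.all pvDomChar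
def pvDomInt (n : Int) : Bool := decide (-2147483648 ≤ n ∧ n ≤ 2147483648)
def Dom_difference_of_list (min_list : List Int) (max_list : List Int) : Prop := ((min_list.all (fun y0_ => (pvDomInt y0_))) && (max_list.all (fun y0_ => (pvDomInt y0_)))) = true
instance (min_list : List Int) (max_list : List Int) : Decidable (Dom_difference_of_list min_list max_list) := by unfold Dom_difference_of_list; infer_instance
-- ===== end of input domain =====

-- B sorts the index list by the negated pairwise difference and returns the head of the
-- stable sort (first argmax) instead of A's running-max/index loop (objective: alternative).

-- ===== PORT A =====
-- literal port of A: running max initialised from element 0, loop over range(len(max_list))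
def difference_of_list (min_list : List Int) (max_list : List Int) : Int :=
  ((PySem.List.pyRange 0 (max_list.length : Int) 1).foldl
      (fun (s : Int × Int) (i : Int) =>
        if s.1 < (PySem.List.pyGet? max_list i).getD 0 - (PySem.List.pyGet? min_list i).getD 0 then
          ((PySem.List.pyGet? max_list i).getD 0 - (PySem.List.pyGet? min_list i).getD 0, i)
        else s)
      ((PySem.List.pyGet? max_list 0).getD 0 - (PySem.List.pyGet? min_list 0).getD 0, 0)).2

-- ===== PORT B =====
-- literal port of B: sorted(range(len(max_list)), key=lambda i: min_list[i]-max_list[i])[0]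
def difference_of_list_alt (min_list : List Int) (max_list : List Int) : Int :=
  (PySem.List.pyGet?
      (PySem.List.sorted (PySem.List.pyRange 0 (max_list.length : Int) 1)
        (fun i => (PySem.List.pyGet? min_list i).getD 0 - (PySem.List.pyGet? max_list i).getD 0)
        false)
      0).getD 0

-- ===== PRECONDITION & SPEC =====
-- A indexes both lists at 0 and min_list at each i < len(max_list); exactly these inputs return.
def Pre_difference_of_list (min_list : List Int) (max_list : List Int) : Prop :=
  0 < max_list.length ∧ max_list.length ≤ min_list.length
instance (min_list : List Int) (max_list : List Int) : Decidable (Pre_difference_of_list min_list max_list) := by unfold Pre_difference_of_list; infer_instance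

def pvWitness_difference_of_list : List Int × List Int := ([1, 2, 3], [5, 9, 4])

def Spec_difference_of_list (min_list : List Int) (max_list : List Int) (out : Int) : Prop := out = difference_of_list_alt min_list max_list
instance (min_list : List Int) (max_list : List Int) (out : Int) : Decidable (Spec_difference_of_list min_list max_list out) := by unfold Spec_difference_of_list; infer_instance

-- ===== CLAIM (what is proved, stated in full; the proofs are below) =====
def Claim_equal_difference_of_list : Prop := ∀ (min_list : List Int) (max_list : List Int), Dom_difference_of_list min_list max_list → Pre_difference_of_list min_list max_list → Spec_difference_of_list min_list max_list (difference_of_list min_list max_list)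

-- ===== LEMMAS AND PROOFS =====

-- head of insertBy, split from its tail so the foldl recursion below goes through
lemma insertBy_cons_split {α : Type} (before : α → α → Bool) (x h : α) (t : List α) :
    PySem.List.insertBy before x (h :: t) =
      (if before x h then x else h) :: (if before x h then h :: t else PySem.List.insertBy before x t) := by
  by_cases hb : before x h <;> simp [PySem.List.insertBy, hb]

-- head of a foldl of insertBy over a nonempty accumulator = running "first minimum" fold
lemma foldl_insertBy_head {α : Type} (before : α → α → Bool) :
    ∀ (xs : List α) (h : α) (t : List α),
      (xs.foldl (fun acc x => PySem.List.insertBy before x acc) (h :: t)).head? =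
        some (xs.foldl (fun b x => if before x b then x else b) h) := by
  intro xs
  induction xs with
  | nil => intro h t; rfl
  | cons x xs ih =>
      intro h t
      simp only [List.foldl_cons, insertBy_cons_split]
      exact ih _ _

-- A's pair-state fold carries (d j, j); reduced to the index-only "first argmax" fold
lemma pairFold_eq_indexFold (d : Int → Int) :
    ∀ (l : List Int) (j : Int),
      l.foldl (fun (s : Int × Int) i => if s.1 < d i then (d i, i) else s) (d j, j) =
        (d (l.foldl (fun b i => if d b < d i then i else b) j),
         l.foldl (fun b i => if d b < d i then i else b) j) := by
  intro l
  induction l with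
  | nil => intro j; rfl
  | cons i l ih =>
      intro j
      simp only [List.foldl_cons]
      by_cases hlt : d j < d i
      · simp only [if_pos hlt]; exact ih i
      · simp only [if_neg hlt]; exact ih j

-- ===== VERDICT (by name: the statement is the Claim_ definition above) =====
theorem difference_of_list_spec : Claim_equal_difference_of_list := by
  intro min_list max_list _ hpre
  obtain ⟨hpos, hlen⟩ := hpre
  unfold Spec_difference_of_list difference_of_list difference_of_list_alt
  -- peel index 0 from the range on both sides
  have hcons : PySem.List.pyRange 0 (max_list.length : Int) 1 =
      0 :: PySem.List.pyRange 1 (max_list.length : Int) 1 :=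
    PySem.List.pyRange_one_cons (by exact_mod_cast hpos)
  rw [hcons]
  -- A side: the first iteration (i = 0) is a no-op (both branches coincide)
  simp only [List.foldl_cons, ite_self]
  have hpair := pairFold_eq_indexFold
      (fun i => (PySem.List.pyGet? max_list i).getD 0 - (PySem.List.pyGet? min_list i).getD 0)
      (PySem.List.pyRange 1 (max_list.length : Int) 1) 0
  beta_reduce at hpair
  rw [hpair]
  -- B side: sorted = foldl insertBy, head via foldl_insertBy_head
  rw [PySem.List.sorted_eq_foldl_insertBy]
  simp only [List.foldl_cons, PySem.List.insertBy]
  have hhead := foldl_insertBy_head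
      (fun a b => decide ((PySem.List.pyGet? min_list a).getD 0 - (PySem.List.pyGet? max_list a).getD 0 <
        (PySem.List.pyGet? min_list b).getD 0 - (PySem.List.pyGet? max_list b).getD 0))
      (PySem.List.pyRange 1 (max_list.length : Int) 1) 0 []
  beta_reduce at hhead
  -- the two step functions agree: k i < k b  ↔  d b < d i
  have hsteps : (fun (b i : Int) =>
        if decide ((PySem.List.pyGet? min_list i).getD 0 - (PySem.List.pyGet? max_list i).getD 0 <
          (PySem.List.pyGet? min_list b).getD 0 - (PySem.List.pyGet? max_list b).getD 0) = true then i else b) =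
      (fun (b i : Int) =>
        if (PySem.List.pyGet? max_list b).getD 0 - (PySem.List.pyGet? min_list b).getD 0 <
          (PySem.List.pyGet? max_list i).getD 0 - (PySem.List.pyGet? min_list i).getD 0 then i else b) := by
    funext b i
    simp only [decide_eq_true_eq]
    by_cases hbi : (PySem.List.pyGet? max_list b).getD 0 - (PySem.List.pyGet? min_list b).getD 0 <
        (PySem.List.pyGet? max_list i).getD 0 - (PySem.List.pyGet? min_list i).getD 0
    · rw [if_pos (by omega), if_pos hbi]
    · rw [if_neg (by omega), if_neg hbi]
  rw [hsteps] at hhead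
  -- pyGet? _ 0 on the nonempty accumulated list is its head
  have hne : ((PySem.List.pyRange 1 (max_list.length : Int) 1).foldl
      (fun acc x => PySem.List.insertBy
        (fun a b => decide ((PySem.List.pyGet? min_list a).getD 0 - (PySem.List.pyGet? max_list a).getD 0 <
          (PySem.List.pyGet? min_list b).getD 0 - (PySem.List.pyGet? max_list b).getD 0)) x acc) [0]) ≠ [] := by
    intro hnil
    rw [hnil] at hhead
    simp at hhead
  obtain ⟨h0, t0, hct⟩ := List.exists_cons_of_ne_nil hne
  rw [hct] at hhead ⊢
  simp only [List.head?_cons, Option.some.injEq] at hhead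
  rw [PySem.List.pyGet?_zero]
  simp [hhead]
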